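-- pv_equiv track=rewrite | github.com/da-in/algorithm-study | Programmers - 문제 풀이/귤 고르기/dain.py | solution
-- ===== SOURCE A (Python) =====
-- from collections import defaultdict
--
-- def solution(k, tangerine):
--     answer = 0
--     tangerine_type = defaultdict(int)
--     for t in tangerine:
--         tangerine_type[t] += 1
--     counts = sorted(list(tangerine_type.values()), reverse=True)
--     for c in counts:
--         k -= c
--         answer += 1
--         if k <= 0:
--             break
--     return answer
-- ===== SOURCE B (Python) =====
-- from collections import defaultdict
--
-- def solution(k, tangerine):
--     # Count occurrences per type, then bucket the counts and walk the buckets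
--     # from the largest count down, taking whole buckets arithmetically.
--     cnt = defaultdict(int)
--     for t in tangerine:
--         cnt[t] += 1
--     counts = list(cnt.values())
--     if not counts:
--         return 0
--     m = max(counts)
--     bucket = [0] * (m + 1)
--     for c in counts:
--         bucket[c] += 1
--     answer = 0
--     for c in range(m, 0, -1):
--         b = bucket[c]
--         if b == 0:
--             continue
--         if k > b * c:
--             # take every type in this bucket and keep going
--             k -= b * c
--             answer += b
--         else:
--             # this bucket finishes the job: take one type, then as many
--             # more as the remaining need requires (ceiling division)
--             answer += 1
--             k -= c
--             if k > 0:
--                 answer += -(-k // c)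
--             return answer
--     return answer
-- ===== Notes on version B (the rewrite author's own statement) =====
-- stated objective: alternative
-- what changed: A sorts the occurrence counts descending and subtracts them one type at a time; B buckets the counts into an array indexed by count and walks the buckets from the largest count down, consuming each whole bucket arithmetically (one subtraction plus a ceiling division instead of one step per type).
import Mathlib
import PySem

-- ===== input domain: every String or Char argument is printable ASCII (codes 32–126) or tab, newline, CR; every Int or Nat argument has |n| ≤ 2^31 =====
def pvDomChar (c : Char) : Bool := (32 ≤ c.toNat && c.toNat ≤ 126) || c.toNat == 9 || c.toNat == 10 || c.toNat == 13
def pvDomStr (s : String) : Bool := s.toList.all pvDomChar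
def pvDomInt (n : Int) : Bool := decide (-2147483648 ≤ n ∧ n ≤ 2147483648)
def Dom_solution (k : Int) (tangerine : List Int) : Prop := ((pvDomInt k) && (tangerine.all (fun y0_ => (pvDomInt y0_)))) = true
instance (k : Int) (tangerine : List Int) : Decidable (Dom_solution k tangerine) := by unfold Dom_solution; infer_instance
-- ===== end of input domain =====

-- B replaces A's comparison sort of the occurrence counts by a counting-sort-style
-- bucket array walked from the largest count down, taking whole buckets arithmetically.

-- ===== PORT A =====
-- the 'for c in counts: k -= c; answer += 1; if k <= 0: break' loop of A
def solLoopA (k ans : Int) : List Int → Int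
  | [] => ans
  | c :: rest => if k - c ≤ 0 then ans + 1 else solLoopA (k - c) (ans + 1) rest

def solution (k : Int) (tangerine : List Int) : Int :=
  let d := tangerine.foldl (fun d t => d.modify t 0 (· + 1)) (PySem.Dict.empty)
  let counts := PySem.List.sorted d.values (fun x => x) true
  solLoopA k 0 counts

-- ===== PORT B =====
-- python's -(-a // b) (ceiling division)
def bCeil (a b : Int) : Int := -(PySem.Int.floordiv (-a) b)

-- 'bucket = [0]*(m+1); for c in counts: bucket[c] += 1'
-- (every c is an occurrence count with 1 ≤ c ≤ m < len(bucket), so the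
--  'c.toNat' index and the total 'set'/'pyGetD' are exact for Python here)
def bBuckets (m : Int) (counts : List Int) : List Int :=
  counts.foldl (fun bk c => bk.set c.toNat (PySem.List.pyGetD bk c 0 + 1))
    (PySem.List.pyRepeat [0] (m + 1))

-- 'for c in range(m, 0, -1): …' with the early return inside the else branch
def solLoopB (bucket : List Int) (k ans : Int) : List Int → Int
  | [] => ans
  | c :: cs =>
    let b := PySem.List.pyGetD bucket c 0
    if b == 0 then solLoopB bucket k ans cs
    else if k > b * c then solLoopB bucket (k - b * c) (ans + b) cs
    else
      let k' := k - c
      if k' > 0 then ans + 1 + bCeil k' c else ans + 1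

def solution_alt (k : Int) (tangerine : List Int) : Int :=
  let d := tangerine.foldl (fun d t => d.modify t 0 (· + 1)) (PySem.Dict.empty)
  let counts := d.values
  match PySem.List.max? counts (fun x => x) with
  | none => 0
  | some m => solLoopB (bBuckets m counts) k 0 (PySem.List.pyRange m 0 (-1))

-- ===== PRECONDITION & SPEC =====
def Spec_solution (k : Int) (tangerine : List Int) (out : Int) : Prop := out = solution_alt k tangerine
instance (k : Int) (tangerine : List Int) (out : Int) : Decidable (Spec_solution k tangerine out) := by unfold Spec_solution; infer_instance

-- ===== CLAIM (what is proved, stated in full; the proofs are below) =====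
def Claim_equal_solution : Prop := ∀ (k : Int) (tangerine : List Int), Dom_solution k tangerine → Spec_solution k tangerine (solution k tangerine)

-- ===== LEMMAS AND PROOFS =====

-- ceiling division facts
theorem bCeil_base {x c : Int} (hc : 0 < c) (h1 : 0 < x) (h2 : x ≤ c) : bCeil x c = 1 := by
  exact (PySem.Int.neg_floordiv_neg_eq_iff_of_pos hc).mpr ⟨by nlinarith, by nlinarith⟩

theorem bCeil_step {x c : Int} (hc : 0 < c) (_h : c < x) : bCeil x c = 1 + bCeil (x - c) c := by
  have hq : (bCeil (x - c) c - 1) * c < x - c ∧ x - c ≤ bCeil (x - c) c * c :=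
    (PySem.Int.neg_floordiv_neg_eq_iff_of_pos hc).mp rfl
  exact (PySem.Int.neg_floordiv_neg_eq_iff_of_pos hc).mpr ⟨by nlinarith [hq.1], by nlinarith [hq.2]⟩

-- the bucket array tabulates List.count
theorem bucket_count (V : List Int) (bk : List Int) (c : Int)
    (hc0 : 0 ≤ c) (hc1 : c < (bk.length : Int))
    (hV : ∀ x ∈ V, 0 ≤ x ∧ x < (bk.length : Int)) :
    PySem.List.pyGetD (V.foldl (fun bk c => bk.set c.toNat (PySem.List.pyGetD bk c 0 + 1)) bk) c 0
      = PySem.List.pyGetD bk c 0 + (V.count c : Int) := by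
  induction V generalizing bk with
  | nil => simp
  | cons x V ih =>
    have hx := hV x (by simp)
    have hlen : (bk.set x.toNat (PySem.List.pyGetD bk x 0 + 1)).length = bk.length := by
      simp
    simp only [List.foldl_cons]
    rw [ih _ (by rw [hlen]; exact hc1) (fun y hy => by rw [hlen]; exact hV y (by simp [hy]))]
    have hcl : c.toNat < bk.length := by omega
    have hxl : x.toNat < bk.length := by omega
    rw [PySem.List.pyGetD_eq_getElem _ _ hc0 (by rw [hlen]; exact hc1)]
    rw [List.getElem_set]
    by_cases hxc : x = c
    · subst hxc
      rw [if_pos rfl, PySem.List.pyGetD_eq_getElem _ _ hc0 hc1, List.count_cons_self]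
      push_cast; ring
    · rw [if_neg (by omega), PySem.List.pyGetD_eq_getElem _ _ hc0 hc1,
        List.count_cons_of_ne (by omega)]

-- A's greedy loop eats a whole constant block it can fully afford
theorem loopA_full_block (b : Nat) (k ans c : Int) (rest : List Int)
    (hc : 0 < c) (hk : (b : Int) * c < k) :
    solLoopA k ans (List.replicate b c ++ rest) = solLoopA (k - b * c) (ans + b) rest := by
  induction b generalizing k ans with
  | zero => simp
  | succ n ih =>
    have hcn : (0:Int) ≤ (n : Int) * c := by positivity
    have hk' : (n : Int) * c < k - c := by push_cast at hk ⊢; nlinarith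
    simp only [List.replicate_succ, List.cons_append, solLoopA]
    rw [if_neg (by omega)]
    rw [ih _ _ hk']
    congr 1 <;> push_cast <;> ring

-- A's greedy loop stops inside a constant block that covers the rest of k
theorem loopA_last_block (b : Nat) (k ans c : Int) (rest : List Int)
    (hc : 0 < c) (hb : 0 < b) (hk : k ≤ (b : Int) * c) :
    solLoopA k ans (List.replicate b c ++ rest)
      = if k - c > 0 then ans + 1 + bCeil (k - c) c else ans + 1 := by
  induction b generalizing k ans with
  | zero => omega
  | succ n ih =>
    simp only [List.replicate_succ, List.cons_append, solLoopA]
    by_cases hkc : k - c ≤ 0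
    · rw [if_pos hkc, if_neg (by omega)]
    · rw [if_neg hkc, if_pos (by omega)]
      rcases Nat.eq_zero_or_pos n with hn | hn
      · exfalso; subst hn; push_cast at hk; omega
      · have hk2 : k - c ≤ (n : Int) * c := by push_cast at hk ⊢; nlinarith
        rw [ih (k - c) (ans + 1) hn hk2]
        by_cases h2 : k - c - c > 0
        · rw [if_pos h2, bCeil_step (x := k - c) hc (by omega)]; ring
        · rw [if_neg h2, bCeil_base hc (by omega) (by omega)]

-- the two loops agree on a bucket decomposition
theorem loopA_eq_loopB (V bucket : List Int) (cs : List Int) (k ans : Int)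
    (hpos : ∀ c ∈ cs, 0 < c)
    (hbk : ∀ c ∈ cs, PySem.List.pyGetD bucket c 0 = (V.count c : Int)) :
    solLoopA k ans ((cs.map (fun c => List.replicate (V.count c) c)).flatten)
      = solLoopB bucket k ans cs := by
  induction cs generalizing k ans with
  | nil => simp [solLoopA, solLoopB]
  | cons c cs ih =>
    have hc : 0 < c := hpos c (by simp)
    have hb : PySem.List.pyGetD bucket c 0 = (V.count c : Int) := hbk c (by simp)
    have hp' : ∀ c' ∈ cs, 0 < c' := fun c' h => hpos c' (List.mem_cons_of_mem _ h)
    have hb' : ∀ c' ∈ cs, PySem.List.pyGetD bucket c' 0 = (V.count c' : Int) :=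
      fun c' h => hbk c' (List.mem_cons_of_mem _ h)
    have ih' := fun k ans => ih k ans hp' hb' 
    simp only [List.map_cons, List.flatten_cons, solLoopB, hb]
    by_cases h0 : V.count c = 0
    · rw [if_pos (by simp [h0]), h0]
      simpa using ih' k ans
    · rw [if_neg (by simpa using h0)]
      by_cases hk : k > (V.count c : Int) * c
      · rw [if_pos hk, loopA_full_block _ _ _ _ _ hc hk, ih']
      · rw [if_neg hk, loopA_last_block _ _ _ _ _ hc (Nat.pos_of_ne_zero h0) (by omega)]

-- sorting the counts descending is the bucket decomposition
theorem sorted_eq_flatten_blocks (V : List Int) (m : Int)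
    (hV : ∀ x ∈ V, 1 ≤ x ∧ x ≤ m) :
    PySem.List.sorted V (fun x => x) true
      = ((PySem.List.pyRange m 0 (-1)).map (fun c => List.replicate (V.count c) c)).flatten := by
  have hnd : (PySem.List.pyRange m 0 (-1)).Nodup := by
    rw [PySem.List.pyRange_neg_one_eq_reverse]
    exact List.nodup_reverse.mpr (PySem.List.nodup_pyRange_one _ _)
  have hsum : ∀ (cs : List Int), cs.Nodup → ∀ x : Int,
      (cs.map fun c => (List.replicate (V.count c) c).count x).sum
        = if x ∈ cs then V.count x else 0 := by
    intro cs hcs x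
    induction cs with
    | nil => simp
    | cons c cs ih =>
      rw [List.map_cons, List.sum_cons, ih (List.Nodup.of_cons hcs), List.count_replicate]
      by_cases hxc : x = c
      · subst hxc
        have hnm : x ∉ cs := (List.nodup_cons.mp hcs).1
        simp [hnm]
      · have hne : (c == x) = false := by simp; omega
        simp [hne, hxc]
  have hperm : (((PySem.List.pyRange m 0 (-1)).map
      (fun c => List.replicate (V.count c) c)).flatten).Perm V := by
    rw [List.perm_iff_count]
    intro x
    rw [List.count_flatten, List.map_map, Function.comp_def, hsum _ hnd x]
    by_cases hx : x ∈ PySem.List.pyRange m 0 (-1)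
    · rw [if_pos hx]
    · rw [if_neg hx]
      symm
      rw [List.count_eq_zero]
      intro hmem
      have := hV x hmem
      rw [PySem.List.mem_pyRange_neg_one] at hx
      omega
  have hpair : List.Pairwise (fun a b => b ≤ a)
      (((PySem.List.pyRange m 0 (-1)).map (fun c => List.replicate (V.count c) c)).flatten) := by
    rw [List.pairwise_flatten]
    constructor
    · intro l hl
      rw [List.mem_map] at hl
      obtain ⟨c, _, rfl⟩ := hl
      rw [List.pairwise_replicate]
      exact Or.inr le_rfl
    · rw [List.pairwise_map]
      have hgt : (PySem.List.pyRange m 0 (-1)).Pairwise (fun a b => b < a) := by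
        rw [PySem.List.pyRange_neg_one_eq_reverse, List.pairwise_reverse]
        exact PySem.List.pairwise_lt_pyRange_one _ _
      exact hgt.imp (fun {c1 c2} h x hx y hy => by
        rw [List.eq_of_mem_replicate hx, List.eq_of_mem_replicate hy]
        exact le_of_lt h)
  exact List.Perm.eq_of_pairwise (fun a b _ _ h1 h2 => le_antisymm h2 h1)
    (PySem.List.sorted_pairwise_rev V _) hpair
    ((PySem.List.sorted_perm V _ true).trans hperm.symm)

-- ===== VERDICT (by name: the statement is the Claim_ definition above) =====
theorem length_foldl_set (W : List Int) (bk : List Int) :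
    (W.foldl (fun bk c => bk.set c.toNat (PySem.List.pyGetD bk c 0 + 1)) bk).length
      = bk.length := by
  induction W generalizing bk with
  | nil => rfl
  | cons x W ih => simp [ih]

theorem solution_spec : Claim_equal_solution := by
  intro k t _
  unfold Spec_solution
  simp only [solution, solution_alt, ← PySem.Dict.counter_eq_foldl]
  set V := (PySem.Dict.counter t).values with hVdef
  have hV1 : ∀ x ∈ V, 1 ≤ x := by
    intro x hx
    rw [hVdef] at hx
    simp only [PySem.Dict.values, PySem.Dict.items_counter, List.map_map, List.mem_map,
      Function.comp_def] at hx
    obtain ⟨a, ha, rfl⟩ := hx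
    rw [PySem.Set.mem_ofList] at ha
    have : 0 < t.count a := List.count_pos_iff.mpr ha
    omega
  cases hmax : PySem.List.max? V (fun x => x) with
  | none =>
    have hnil : V = [] := (PySem.List.max?_eq_none_iff _ _).mp hmax
    rw [hnil, (PySem.List.sorted_eq_nil_iff _ _ _).mpr rfl]
    rfl
  | some m =>
    have hle : ∀ x ∈ V, x ≤ m := PySem.List.max?_isMax hmax
    have hm1 : 1 ≤ m := hV1 m (PySem.List.max?_mem hmax)
    have hbV : ∀ x ∈ V, 1 ≤ x ∧ x ≤ m := fun x hx => ⟨hV1 x hx, hle x hx⟩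
    have hlen : ((bBuckets m V).length : Int) = m + 1 := by
      simp only [bBuckets, length_foldl_set, PySem.List.pyRepeat_singleton,
        List.length_replicate]
      omega
    have hbk : ∀ c ∈ PySem.List.pyRange m 0 (-1),
        PySem.List.pyGetD (bBuckets m V) c 0 = (V.count c : Int) := by
      intro c hcm
      rw [PySem.List.mem_pyRange_neg_one] at hcm
      have hlen0 : ((PySem.List.pyRepeat [(0:Int)] (m+1)).length : Int) = m + 1 := by
        simp [PySem.List.pyRepeat_singleton]; omega
      have := bucket_count V (PySem.List.pyRepeat [(0:Int)] (m+1)) c (by omega)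
        (by omega)
        (fun x hx => ⟨by have := hV1 x hx; omega, by have := hle x hx; omega⟩)
      rw [bBuckets, this, PySem.List.pyGetD_of_nonneg _ _ (by omega),
        PySem.List.pyRepeat_singleton]
      simp
    have hpos : ∀ c ∈ PySem.List.pyRange m 0 (-1), 0 < c := by
      intro c hcm
      rw [PySem.List.mem_pyRange_neg_one] at hcm
      omega
    rw [sorted_eq_flatten_blocks V m hbV, loopA_eq_loopB V (bBuckets m V) _ k 0 hpos hbk]
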